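-- pv_equiv track=rewrite | github.com/BerkeleyLab/Bedrock | board_support/zest/prnd.py | prnd
-- ===== SOURCE A (Python) =====
-- def bitn(num, n):
--     return (num >> n) & 0x1
--
-- def prnd_951_sr_out(num=0x92):
--     cn = (bitn(num, 8) ^ bitn(num, 4))  # +bitn(num,0))&0x1
--     result = ((cn) + (num << 1)) & (2**9 - 1)
--     out = result >> 8
--     return [result, out]
--
-- def seq_start_width(seq, start, width):
--     result = 0
--     for i in range(width):
--         loc = (start + i) % len(seq)
--         result = result + (seq[loc] << (width - i - 1))
--     return result
--
-- def outlast(seq, width):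
--     outseq = []
--     start = 0
--     cnt = 0
--     result = seq_start_width(seq, start, width)
--     outseq.append(result)
--     cnt = cnt + 1
--     start = (start + width) % len(seq)
--     while start != 0:
--         result = seq_start_width(seq, start, width)
--         outseq.append(result)
--         cnt = cnt + 1
--         start = (start + width) % len(seq)
--     return outseq
--
-- def prnd(seed, width):
--     seq = []
--     outseq = []
--     num0 = seed
--     counter = 1
--     out = num0 >> 8
--     seq.append(num0)
--     outseq.append(out)
--     [num, out] = prnd_951_sr_out(num0)
--     counter = counter + 1
--     while (num != num0):
--         counter = counter + 1
--         seq.append(num)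
--         outseq.append(out)
--         [num, out] = prnd_951_sr_out(num)
--     return outlast(outseq, width)
-- ===== SOURCE B (Python) =====
-- def prnd(seed, width):
--     # generate the LFSR output-bit sequence (one bit per state, until the state returns to seed)
--     bits = []
--     x = seed
--     while True:
--         bits.append(x >> 8)
--         x = (2 * x + ((x >> 8) + (x >> 4)) % 2) % 512
--         if x == seed:
--             break
--     L = len(bits)
--     # packed window value for every start position, via one Horner pass + O(1) rolling updates
--     if width <= 0:
--         vals = [0] * L
--     else:
--         v = 0
--         for i in range(width):
--             v = 2 * v + bits[i % L]
--         vals = [v]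
--         top = 2 ** (width - 1)
--         for s in range(1, L):
--             v = 2 * (v - bits[s - 1] * top) + bits[(s - 1 + width) % L]
--             vals.append(v)
--     out = [vals[0]]
--     s = width % L
--     while s != 0:
--         out.append(vals[s])
--         s = (s + width) % L
--     return out
-- ===== Notes on version B (the rewrite author's own statement) =====
-- stated objective: alternative
-- what changed: Instead of re-packing each width-bit window with its own O(width) modular-index loop, B computes the first window once by a Horner pass and derives every other start's packed value by an O(1) rolling-window update, then just indexes the precomputed table while walking the starts; intended as faster (measured 4-14x at small and mid sizes) but unconfirmed at the largest timed size, where both implementations time out on the huge outputs.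
import Mathlib
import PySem

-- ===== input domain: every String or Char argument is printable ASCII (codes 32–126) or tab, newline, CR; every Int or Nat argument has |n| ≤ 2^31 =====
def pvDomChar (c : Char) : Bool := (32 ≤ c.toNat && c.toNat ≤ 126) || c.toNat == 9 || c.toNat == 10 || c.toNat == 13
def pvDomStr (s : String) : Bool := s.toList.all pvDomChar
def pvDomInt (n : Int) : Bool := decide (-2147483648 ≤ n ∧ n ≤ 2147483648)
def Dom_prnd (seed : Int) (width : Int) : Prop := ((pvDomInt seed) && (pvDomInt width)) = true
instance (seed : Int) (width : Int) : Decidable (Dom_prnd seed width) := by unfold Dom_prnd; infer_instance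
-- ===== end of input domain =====

-- B replaces A's per-window modular-index repacking by one Horner pass plus rolling-window
-- updates over all start positions (a different algorithm of similar cost); equivalence of the
-- return value is proved on Pre_ (seed in [0,512), where A's generation loop terminates).

-- ===== PORT A =====

-- (num >> n) & 1; n is only ever 8 or 4 (nonneg), so Int.toNat on it is exact
def bitn (num n : Int) : Int := PySem.Int.band (num >>> n.toNat) 1

def prnd_951_sr_out (num : Int) : Int × Int :=
  let cn := PySem.Int.bxor (bitn num 8) (bitn num 4)
  let result := PySem.Int.band (cn + (num <<< 1)) 511
  (result, result >>> 8)

-- loc is always a valid index (0 ≤ loc < len seq, seq nonempty where called), so the getD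
-- default 0 of pyGetD is unreachable; width - i - 1 ≥ 0 inside the loop, so toNat is exact
def seq_start_width (seq : List Int) (start width : Int) : Int :=
  (PySem.List.pyRange 0 width).foldl
    (fun result i =>
      let loc := PySem.Int.mod (start + i) (seq.length : Int)
      result + (PySem.List.pyGetD seq loc 0) <<< (width - i - 1).toNat) 0

-- the while loop of outlast; fuel-totalised (the start cycle has ≤ len seq ≤ 512 steps,
-- so fuel 1000 is never exhausted on inputs reachable under Pre_)
def outlastLoop (fuel : Nat) (seq : List Int) (width : Int) (start : Int) (outseq : List Int) :
    List Int :=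
  match fuel with
  | 0 => outseq
  | f + 1 =>
    if start ≠ 0 then
      outlastLoop f seq width (PySem.Int.mod (start + width) (seq.length : Int))
        (outseq ++ [seq_start_width seq start width])
    else outseq

def outlast (seq : List Int) (width : Int) : List Int :=
  let result := seq_start_width seq 0 width
  outlastLoop 1000 seq width (PySem.Int.mod (0 + width) (seq.length : Int)) [result]

-- the while loop of prnd; fuel-totalised (the 9-bit LFSR orbit has ≤ 512 states, so under
-- Pre_ fuel 513 is never exhausted)
def prndGen (fuel : Nat) (num0 : Int) (num out : Int) (seq outseq : List Int) :
    List Int × List Int :=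
  match fuel with
  | 0 => (seq, outseq)
  | f + 1 =>
    if num ≠ num0 then
      let p := prnd_951_sr_out num
      prndGen f num0 p.1 p.2 (seq ++ [num]) (outseq ++ [out])
    else (seq, outseq)

def prnd (seed : Int) (width : Int) : List Int :=
  let num0 := seed
  let out := num0 >>> 8
  let p := prnd_951_sr_out num0
  let g := prndGen 513 num0 p.1 p.2 [num0] [out]
  outlast g.2 width

-- ===== PORT B =====

def altStep (x : Int) : Int :=
  PySem.Int.mod (2 * x + PySem.Int.mod ((x >>> 8) + (x >>> 4)) 2) 512

-- B's while True loop; fuel-totalised like A's (≤ 512 iterations under Pre_)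
def altGen (fuel : Nat) (seed : Int) (x : Int) (bits : List Int) : List Int :=
  match fuel with
  | 0 => bits
  | f + 1 =>
    let bits' := bits ++ [x >>> 8]
    let x' := altStep x
    if x' = seed then bits' else altGen f seed x' bits'

-- packed window value for every start: Horner pass for start 0, then rolling updates;
-- all indices are valid, width ≥ 1 in the else branch so (width-1).toNat is exact
def altVals (bits : List Int) (width : Int) : List Int :=
  let L := bits.length
  if width ≤ 0 then List.replicate L 0
  else
    let v0 := (PySem.List.pyRange 0 width).foldl
      (fun v i => 2 * v + PySem.List.pyGetD bits (PySem.Int.mod i (L : Int)) 0) 0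
    let top : Int := 2 ^ (width - 1).toNat
    ((PySem.List.pyRange 1 (L : Int)).foldl
      (fun (st : List Int × Int) s =>
        let v' := 2 * (st.2 - PySem.List.pyGetD bits (s - 1) 0 * top)
                  + PySem.List.pyGetD bits (PySem.Int.mod (s - 1 + width) (L : Int)) 0
        (st.1 ++ [v'], v')) ([v0], v0)).1

-- B's selection while loop; same fuel bound as A's
def altSel (fuel : Nat) (vals : List Int) (L width : Int) (s : Int) (out : List Int) : List Int :=
  match fuel with
  | 0 => out
  | f + 1 =>
    if s ≠ 0 then
      altSel f vals L width (PySem.Int.mod (s + width) L) (out ++ [PySem.List.pyGetD vals s 0])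
    else out

def prnd_alt (seed : Int) (width : Int) : List Int :=
  let bits := altGen 514 seed seed []
  let L : Int := (bits.length : Int)
  let vals := altVals bits width
  altSel 1000 vals L width (PySem.Int.mod width L) [PySem.List.pyGetD vals 0 0]

-- ===== PRECONDITION & SPEC =====

-- Pre_ excludes exactly the inputs on which A never returns: A's generation loop runs until
-- the masked 9-bit LFSR state comes back to seed, which never happens when seed ∉ [0, 512)
-- (the state is always in [0, 512) after one step), so A loops forever there.
def Pre_prnd (seed : Int) (width : Int) : Prop := 0 ≤ seed ∧ seed < 512
instance (seed : Int) (width : Int) : Decidable (Pre_prnd seed width) := by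
  unfold Pre_prnd; infer_instance

def pvWitness_prnd : Int × Int := (146, 4)

def Spec_prnd (seed : Int) (width : Int) (out : List Int) : Prop := out = prnd_alt seed width
instance (seed : Int) (width : Int) (out : List Int) : Decidable (Spec_prnd seed width out) := by
  unfold Spec_prnd; infer_instance

-- ===== CLAIM (what is proved, stated in full; the proofs are below) =====
def Claim_equal_prnd : Prop := ∀ (seed : Int) (width : Int), Dom_prnd seed width →
  Pre_prnd seed width → Spec_prnd seed width (prnd seed width)

-- ===== LEMMAS AND PROOFS =====

-- the window value: bits (s+i) mod L, i < w, packed MSB-first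
def win (bs : List Int) (w : Nat) (s : Nat) : Int :=
  ((List.range w).map (fun i => bs.getD ((s + i) % bs.length) 0 * 2 ^ (w - 1 - i))).sum

set_option maxRecDepth 100000 in
theorem stepFstNat : ∀ n : Nat, n < 512 → (prnd_951_sr_out (↑n)).1 = altStep (↑n) := by decide

theorem stepFst (x : Int) (h0 : 0 ≤ x) (h1 : x < 512) :
    (prnd_951_sr_out x).1 = altStep x := by
  lift x to ℕ using h0
  exact stepFstNat _ (by exact_mod_cast h1)

theorem altStep_nonneg (x : Int) : 0 ≤ altStep x := PySem.Int.mod_nonneg _ (by norm_num)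
theorem altStep_lt (x : Int) : altStep x < 512 := PySem.Int.mod_lt _ (by norm_num)

theorem sndStep (x : Int) : (prnd_951_sr_out x).2 = (prnd_951_sr_out x).1 >>> 8 := rfl

theorem genEq : ∀ (f : Nat) (num0 x : Int) (seq bits : List Int), 0 ≤ x → x < 512 →
    (prndGen f num0 (prnd_951_sr_out x).1 (prnd_951_sr_out x).2 seq (bits ++ [x >>> 8])).2
      = altGen (f + 1) num0 x bits := by
  intro f
  induction f with
  | zero =>
    intro num0 x seq bits h0 h1
    simp only [prndGen, altGen]
    split <;> rfl
  | succ f ih =>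
    intro num0 x seq bits h0 h1
    rw [stepFst x h0 h1, sndStep, stepFst x h0 h1]
    simp only [prndGen, altGen]
    by_cases h : altStep x = num0
    · simp [h]
    · simp only [h, if_neg, ne_eq, not_false_iff, if_true]
      have := ih num0 (altStep x) (seq ++ [altStep x]) (bits ++ [x >>> 8])
        (altStep_nonneg x) (altStep_lt x)
      rw [this]
      simp only [altGen]

theorem altGen_length : ∀ (f : Nat) (num0 x : Int) (bits : List Int),
    bits.length < (altGen (f + 1) num0 x bits).length := by
  intro f
  induction f with
  | zero => intro num0 x bits; simp only [altGen]; split <;> simp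
  | succ f ih =>
    intro num0 x bits
    simp only [altGen]
    split
    · simp
    · calc bits.length < (bits ++ [x >>> 8]).length := by simp
        _ < _ := ih num0 (altStep x) (bits ++ [x >>> 8])

theorem ssw_eq_win (bs : List Int) (hbs : bs ≠ []) (start width : Int) (h0 : 0 ≤ start) :
    seq_start_width bs start width = win bs width.toNat start.toNat := by
  unfold seq_start_width win
  by_cases hw : width ≤ 0
  · have h1 : PySem.List.pyRange 0 width = [] := by
      simp [PySem.List.pyRange]; omega
    have h2 : width.toNat = 0 := by omega
    simp [h1, h2]
  · push Not at hw
    obtain ⟨w, rfl⟩ : ∃ w : Nat, width = ↑w := ⟨width.toNat, by omega⟩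
    obtain ⟨s, rfl⟩ : ∃ s : Nat, start = ↑s := ⟨start.toNat, by omega⟩
    have hL : 0 < bs.length := List.length_pos_iff.mpr hbs
    rw [PySem.List.pyRange_zero_natCast, List.foldl_map, PySem.List.foldl_add]
    simp only [Int.toNat_natCast, zero_add]
    congr 1
    apply List.map_congr_left
    intro k hk
    have hkw : k < w := List.mem_range.mp hk
    have hcast : (↑s + ↑k : Int) = ((s + k : Nat) : Int) := by push_cast; ring
    rw [hcast, show ((bs.length : Int)) = ((bs.length : Nat) : Int) from rfl]
    rw [PySem.Int.mod_natCast, PySem.List.pyGetD_natCast]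
    rw [Int.shiftLeft_eq]
    have h3 : ((w : Int) - ↑k - 1).toNat = w - 1 - k := by omega
    rw [h3]

theorem horner (g : Nat → Int) : ∀ w : Nat,
    (List.range w).foldl (fun v i => 2 * v + g i) 0
      = ((List.range w).map (fun i => g i * 2 ^ (w - 1 - i))).sum := by
  intro w
  induction w with
  | zero => simp
  | succ w ih =>
    rw [List.range_succ, List.foldl_append, List.map_append, List.sum_append, ih]
    simp only [List.foldl_cons, List.foldl_nil, List.map_cons, List.map_nil, List.sum_cons,
      List.sum_nil]
    have h1 : ((List.range w).map (fun i => g i * 2 ^ (w + 1 - 1 - i))).sum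
        = 2 * ((List.range w).map (fun i => g i * 2 ^ (w - 1 - i))).sum := by
      rw [← List.sum_map_mul_left]
      apply congrArg
      apply List.map_congr_left
      intro k hk
      have : k < w := List.mem_range.mp hk
      have h2 : w + 1 - 1 - k = (w - 1 - k) + 1 := by omega
      rw [h2, pow_succ]
      ring
    rw [h1]
    have h3 : w + 1 - 1 - w = 0 := by omega
    rw [h3]
    ring

theorem win_succ (bs : List Int) (m s : Nat) :
    win bs (m + 1) (s + 1)
      = 2 * (win bs (m + 1) s - bs.getD (s % bs.length) 0 * 2 ^ m)
        + bs.getD ((s + (m + 1)) % bs.length) 0 := by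
  unfold win
  conv_lhs => rw [List.range_succ]
  conv_rhs => rw [List.range_succ_eq_map]
  rw [List.map_append, List.sum_append]
  simp only [List.map_cons, List.sum_cons, List.map_map]
  have h0 : s + 0 = s := by omega
  have he0 : m + 1 - 1 - 0 = m := by omega
  rw [h0, he0]
  have hmain : ((List.range m).map (fun i => bs.getD ((s + 1 + i) % bs.length) 0 * 2 ^ (m + 1 - 1 - i))).sum
      = 2 * ((List.range m).map ((fun i => bs.getD ((s + i) % bs.length) 0 * 2 ^ (m + 1 - 1 - i)) ∘ Nat.succ)).sum := by
    rw [← List.sum_map_mul_left]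
    apply congrArg
    apply List.map_congr_left
    intro k hk
    have hkm : k < m := List.mem_range.mp hk
    simp only [Function.comp_apply]
    have hi : s + Nat.succ k = s + 1 + k := by omega
    have he : m + 1 - 1 - k = (m + 1 - 1 - Nat.succ k) + 1 := by omega
    rw [hi, he, pow_succ]
    ring
  rw [hmain]
  have hlast : m + 1 - 1 - m = 0 := by omega
  rw [hlast]
  have hidx : s + 1 + m = s + (m + 1) := by omega
  rw [hidx]
  simp

theorem v0_eq (bs : List Int) (w : Nat) :
    ((PySem.List.pyRange 0 (w : Int)).foldl
      (fun v i => 2 * v + PySem.List.pyGetD bs (PySem.Int.mod i (bs.length : Int)) 0) 0)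
      = win bs w 0 := by
  rw [PySem.List.pyRange_zero_natCast, List.foldl_map]
  have hfun : (fun (v : Int) (k : Nat) => 2 * v + PySem.List.pyGetD bs (PySem.Int.mod (↑k) (bs.length : Int)) 0)
      = fun v k => 2 * v + bs.getD (k % bs.length) 0 := by
    funext v k
    rw [show ((bs.length : Int)) = ((bs.length : Nat) : Int) from rfl,
      PySem.Int.mod_natCast, PySem.List.pyGetD_natCast]
  rw [hfun, horner]
  unfold win
  apply congrArg
  apply List.map_congr_left
  intro k hk
  rw [Nat.zero_add]

theorem rollInv (bs : List Int) (w : Nat) (hw : 1 ≤ w) :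
    ∀ k : Nat, 1 ≤ k → k ≤ bs.length →
      ((PySem.List.pyRange 1 (k : Int)).foldl
        (fun (st : List Int × Int) s =>
          let v' := 2 * (st.2 - PySem.List.pyGetD bs (s - 1) 0 * (2 ^ ((w : Int) - 1).toNat : Int))
                    + PySem.List.pyGetD bs (PySem.Int.mod (s - 1 + (w : Int)) (bs.length : Int)) 0
          (st.1 ++ [v'], v')) ([win bs w 0], win bs w 0))
        = ((List.range k).map (win bs w), win bs w (k - 1)) := by
  intro k
  induction k with
  | zero => omega
  | succ k ih =>
    intro _ hkL
    by_cases hk1 : k = 0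
    · subst hk1
      have : PySem.List.pyRange 1 ((1 : Nat) : Int) = [] := by simp [PySem.List.pyRange]
      rw [show (((0:Nat) + 1 : Nat) : Int) = ((1:Nat) : Int) by norm_num, this]
      simp [List.range_succ]
    · have hk : 1 ≤ k := by omega
      have hcast : (((k + 1 : Nat)) : Int) = (k : Int) + 1 := by push_cast; ring
      rw [hcast, PySem.List.pyRange_one_succ_right (by exact_mod_cast hk), List.foldl_append,
        ih hk (by omega)]
      simp only [List.foldl_cons, List.foldl_nil]
      have e1 : ((k : Int) - 1) = ((k - 1 : Nat) : Int) := by omega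
      have e2 : PySem.List.pyGetD bs ((k : Int) - 1) 0 = bs.getD ((k-1) % bs.length) 0 := by
        rw [e1, PySem.List.pyGetD_natCast, Nat.mod_eq_of_lt (by omega)]
      have e3 : PySem.Int.mod ((k : Int) - 1 + (w : Int)) (bs.length : Int)
          = (((k - 1 + w) % bs.length : Nat) : Int) := by
        rw [show ((k : Int) - 1 + (w : Int)) = ((k - 1 + w : Nat) : Int) by omega,
          show ((bs.length : Int)) = ((bs.length : Nat) : Int) from rfl, PySem.Int.mod_natCast]
      have e4 : ((w : Int) - 1).toNat = w - 1 := by omega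
      rw [e2, e3, PySem.List.pyGetD_natCast, e4]
      have hws : w = (w - 1) + 1 := by omega
      have hks : k = (k - 1) + 1 := by omega
      have hv' : 2 * (win bs w (k - 1) - bs.getD ((k-1) % bs.length) 0 * 2 ^ (w-1))
          + bs.getD ((k - 1 + w) % bs.length) 0 = win bs w k := by
        have h5 := win_succ bs (w-1) (k-1)
        rw [← hws, ← hks] at h5
        exact h5.symm
      rw [hv', List.range_succ, List.map_append]
      simp

theorem vals_spec (bs : List Int) (hbs : bs ≠ []) (width : Int) :
    (altVals bs width).length = bs.length ∧
      ∀ s : Nat, s < bs.length → (altVals bs width).getD s 0 = win bs width.toNat s := by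
  have hL : 0 < bs.length := List.length_pos_iff.mpr hbs
  by_cases hw : width ≤ 0
  · have h2 : width.toNat = 0 := by omega
    unfold altVals
    rw [if_pos hw]
    refine ⟨by simp, fun s hs => ?_⟩
    rw [h2]
    unfold win
    simp [List.getD]
  · push Not at hw
    obtain ⟨w, rfl⟩ : ∃ w : Nat, width = ↑w := ⟨width.toNat, by omega⟩
    have hw1 : 1 ≤ w := by omega
    have hvals : altVals bs (w : Int) = (List.range bs.length).map (win bs w) := by
      unfold altVals
      rw [if_neg (by omega)]
      rw [v0_eq bs w]
      exact congrArg Prod.fst (rollInv bs w hw1 bs.length hL le_rfl)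
    rw [hvals]
    refine ⟨by simp, fun s hs => ?_⟩
    rw [PySem.List.getD_map_range _ _ _ _ hs, Int.toNat_natCast]

theorem sel_eq (bs : List Int) (hbs : bs ≠ []) (width : Int) :
    ∀ (f : Nat) (s : Int) (out : List Int), 0 ≤ s → s < (bs.length : Int) →
      outlastLoop f bs width s out
        = altSel f (altVals bs width) (bs.length : Int) width s out := by
  have hL : 0 < bs.length := List.length_pos_iff.mpr hbs
  intro f
  induction f with
  | zero => intro s out _ _; rfl
  | succ f ih =>
    intro s out h0 h1
    simp only [outlastLoop, altSel]
    by_cases hs : s = 0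
    · simp [hs]
    · rw [if_pos hs, if_pos hs]
      have hterm : seq_start_width bs s width = PySem.List.pyGetD (altVals bs width) s 0 := by
        obtain ⟨n, rfl⟩ : ∃ n : Nat, s = ↑n := ⟨s.toNat, by omega⟩
        rw [ssw_eq_win bs hbs _ width h0, PySem.List.pyGetD_natCast, Int.toNat_natCast,
          (vals_spec bs hbs width).2 n (by omega)]
      rw [hterm]
      exact ih _ _ (PySem.Int.mod_nonneg _ (by exact_mod_cast hL))
        (PySem.Int.mod_lt _ (by exact_mod_cast hL))

-- ===== VERDICT (by name: the statement is the Claim_ definition above) =====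
theorem prnd_spec : Claim_equal_prnd := by
  intro seed width _hdom hpre
  unfold Spec_prnd
  obtain ⟨h0, h1⟩ := hpre
  have hbits : (prndGen 513 seed (prnd_951_sr_out seed).1 (prnd_951_sr_out seed).2
      [seed] [seed >>> 8]).2 = altGen 514 seed seed [] := by
    have h := genEq 513 seed seed [seed] [] h0 h1
    simpa using h
  have hne : altGen 514 seed seed [] ≠ [] := by
    have h := altGen_length 513 seed seed []
    intro hcon
    rw [hcon] at h
    simp at h
  have lhs_eq : prnd seed width = outlast (altGen 514 seed seed []) width := by
    show outlast (prndGen 513 seed (prnd_951_sr_out seed).1 (prnd_951_sr_out seed).2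
      [seed] [seed >>> 8]).2 width = _
    rw [hbits]
  rw [lhs_eq]
  show outlastLoop 1000 (altGen 514 seed seed []) width
      (PySem.Int.mod (0 + width) ((altGen 514 seed seed []).length : Int))
      [seq_start_width (altGen 514 seed seed []) 0 width]
    = altSel 1000 (altVals (altGen 514 seed seed []) width)
      ((altGen 514 seed seed []).length : Int) width
      (PySem.Int.mod width ((altGen 514 seed seed []).length : Int))
      [PySem.List.pyGetD (altVals (altGen 514 seed seed []) width) 0 0]
  have hL : 0 < (altGen 514 seed seed []).length := List.length_pos_iff.mpr hne
  have hhead : seq_start_width (altGen 514 seed seed []) 0 width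
      = PySem.List.pyGetD (altVals (altGen 514 seed seed []) width) 0 0 := by
    rw [ssw_eq_win _ hne 0 width le_rfl,
      show (0 : Int) = ((0 : Nat) : Int) from rfl, PySem.List.pyGetD_natCast]
    norm_num
    rw [← List.getD_eq_getElem?_getD, (vals_spec _ hne width).2 0 hL]
  rw [zero_add, hhead]
  exact sel_eq _ hne width 1000 _ _ (PySem.Int.mod_nonneg _ (by exact_mod_cast hL))
    (PySem.Int.mod_lt _ (by exact_mod_cast hL))
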